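-- pv_equiv track=rewrite | github.com/m1nhd4cc/CTF_Journey | Challenges/MetaCTF2025/Crypto/chal_1.py | to_seeded_value
-- ===== SOURCE A (Python) =====
-- def to_seeded_value(s1, s2):
--     s = s1 * s2
--     for i in range(1,31337*3):
--         s+=7
--         s*=s1
--         s+=s2
--         s*=s2
--         s+=s1
--         s %= 2**16
--     return s
-- ===== SOURCE B (Python) =====
-- def _pow_affine(a, c, n, M):
--     # n-th power of the affine map x -> (a*x + c) % M, by squaring.
--     if n == 0:
--         return (1, 0)
--     pa, pc = _pow_affine((a * a) % M, (a * c + c) % M, n >> 1, M)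
--     if n & 1:
--         return ((a * pa) % M, (a * pc + c) % M)
--     return (pa, pc)
--
--
-- def to_seeded_value(s1, s2):
--     # The loop body is the affine map s -> (s1*s2)*s + (7*s1*s2 + s2*s2 + s1) mod 2**16,
--     # applied 31337*3 - 1 times to s0 = s1*s2; compute its power by squaring.
--     M = 1 << 16
--     a = (s1 * s2) % M
--     c = (7 * s1 * s2 + s2 * s2 + s1) % M
--     pa, pc = _pow_affine(a, c, 31337 * 3 - 1, M)
--     return (pa * (s1 * s2) + pc) % M
-- ===== Notes on version B (the rewrite author's own statement) =====
-- stated objective: faster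
-- what changed: Replaces the 94010-iteration loop with binary exponentiation of the loop body viewed as the affine map s -> (s1*s2)*s + (7*s1*s2+s2*s2+s1) mod 2**16, applied to s0 = s1*s2.
import Mathlib
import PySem

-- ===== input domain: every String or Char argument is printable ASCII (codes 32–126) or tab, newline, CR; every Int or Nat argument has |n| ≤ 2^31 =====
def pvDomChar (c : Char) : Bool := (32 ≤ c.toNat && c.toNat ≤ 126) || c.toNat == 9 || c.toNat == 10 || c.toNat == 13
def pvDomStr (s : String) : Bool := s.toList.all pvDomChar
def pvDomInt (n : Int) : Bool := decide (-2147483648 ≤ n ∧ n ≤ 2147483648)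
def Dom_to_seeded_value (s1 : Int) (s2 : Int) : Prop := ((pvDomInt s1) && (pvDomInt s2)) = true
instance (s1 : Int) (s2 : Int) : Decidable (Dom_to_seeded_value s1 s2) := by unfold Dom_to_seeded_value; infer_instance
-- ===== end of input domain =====

set_option maxRecDepth 4000


-- B replaces the 94010-step loop by binary exponentiation of the loop's affine map mod 2^16 (faster: O(log n) vs O(n) steps).

-- ===== PORT A =====
-- literal port of A's loop: for i in range(1, 31337*3): s = (((s+7)*s1+s2)*s2+s1) % 2**16
def to_seeded_value (s1 : Int) (s2 : Int) : Int :=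
  (PySem.List.pyRange 1 (31337 * 3) 1).foldl
    (fun s _ => PySem.Int.mod ((((s + 7) * s1) + s2) * s2 + s1) 65536)
    (s1 * s2)

-- ===== PORT B =====
-- port of Source B's _pow_affine: n-th power of x ↦ (a*x + c) % 2**16 by squaring
def powAffine (a c : Int) (n : Nat) : Int × Int :=
  if _h : n = 0 then (1, 0)
  else
    let p := powAffine (PySem.Int.mod (a * a) 65536) (PySem.Int.mod (a * c + c) 65536) (n / 2)
    if n % 2 = 1 then (PySem.Int.mod (a * p.1) 65536, PySem.Int.mod (a * p.2 + c) 65536)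
    else p
termination_by n
decreasing_by exact Nat.div_lt_self (Nat.pos_of_ne_zero _h) (by omega)

def to_seeded_value_alt (s1 : Int) (s2 : Int) : Int :=
  let a := PySem.Int.mod (s1 * s2) 65536
  let c := PySem.Int.mod (7 * s1 * s2 + s2 * s2 + s1) 65536
  let p := powAffine a c (31337 * 3 - 1)
  PySem.Int.mod (p.1 * (s1 * s2) + p.2) 65536

-- ===== PRECONDITION & SPEC =====
def Spec_to_seeded_value (s1 : Int) (s2 : Int) (out : Int) : Prop := out = to_seeded_value_alt s1 s2
instance (s1 : Int) (s2 : Int) (out : Int) : Decidable (Spec_to_seeded_value s1 s2 out) := by unfold Spec_to_seeded_value; infer_instance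

-- ===== CLAIM (what is proved, stated in full; the proofs are below) =====
def Claim_equal_to_seeded_value : Prop := ∀ (s1 : Int) (s2 : Int), Dom_to_seeded_value s1 s2 → Spec_to_seeded_value s1 s2 (to_seeded_value s1 s2)

-- ===== LEMMAS AND PROOFS =====

theorem pv_cast_mod (x : Int) : ((PySem.Int.mod x 65536 : Int) : ZMod 65536) = (x : ZMod 65536) := by
  rw [PySem.Int.mod_eq_emod_of_pos (by norm_num)]
  exact_mod_cast ZMod.intCast_mod x 65536

theorem pv_mod_nonneg (x : Int) : 0 ≤ PySem.Int.mod x 65536 := by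
  rw [PySem.Int.mod_eq_emod_of_pos (by norm_num)]
  exact Int.emod_nonneg x (by norm_num)

theorem pv_mod_lt (x : Int) : PySem.Int.mod x 65536 < 65536 := by
  rw [PySem.Int.mod_eq_emod_of_pos (by norm_num)]
  exact Int.emod_lt_of_pos x (by norm_num)

theorem pv_foldl_const {α β : Type} (f : α → α) (l : List β) (init : α) :
    l.foldl (fun s _ => f s) init = f^[l.length] init := by
  induction l generalizing init with
  | nil => rfl
  | cons b t ih => simp [List.foldl_cons, ih, Function.iterate_succ_apply]

theorem pv_cast_iterate (s1 s2 : Int) (n : Nat) (x : Int) :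
    (((fun s => PySem.Int.mod ((((s + 7) * s1) + s2) * s2 + s1) 65536)^[n] x : Int) : ZMod 65536)
      = (fun y : ZMod 65536 => (s1 : ZMod 65536) * (s2 : ZMod 65536) * y
          + (7 * (s1 : ZMod 65536) * (s2 : ZMod 65536) + (s2 : ZMod 65536) * (s2 : ZMod 65536) + (s1 : ZMod 65536)))^[n] (x : ZMod 65536) := by
  induction n generalizing x with
  | zero => rfl
  | succ k ih =>
    rw [Function.iterate_succ_apply, Function.iterate_succ_apply, ih]
    congr 1
    rw [pv_cast_mod]
    push_cast
    ring

theorem pv_powAffine_spec (n : Nat) : ∀ (a c : Int) (x : ZMod 65536),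
    ((powAffine a c n).1 : ZMod 65536) * x + ((powAffine a c n).2 : ZMod 65536)
      = (fun y : ZMod 65536 => (a : ZMod 65536) * y + (c : ZMod 65536))^[n] x := by
  induction n using Nat.strong_induction_on with
  | _ n ih =>
    intro a c x
    by_cases h : n = 0
    · subst h; simp [powAffine]
    · rw [powAffine]
      simp only [h, dite_false]
      have hlt : n / 2 < n := Nat.div_lt_self (Nat.pos_of_ne_zero h) (by omega)
      have ihh := ih (n / 2) hlt (PySem.Int.mod (a * a) 65536) (PySem.Int.mod (a * c + c) 65536)
      have hsq : ∀ y : ZMod 65536,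
          (fun y : ZMod 65536 => ((PySem.Int.mod (a * a) 65536 : Int) : ZMod 65536) * y
            + ((PySem.Int.mod (a * c + c) 65536 : Int) : ZMod 65536))^[n / 2] y
          = (fun y : ZMod 65536 => (a : ZMod 65536) * y + (c : ZMod 65536))^[2 * (n / 2)] y := by
        intro y
        have hfun : (fun y : ZMod 65536 => ((PySem.Int.mod (a * a) 65536 : Int) : ZMod 65536) * y
            + ((PySem.Int.mod (a * c + c) 65536 : Int) : ZMod 65536))
            = (fun y : ZMod 65536 => (a : ZMod 65536) * y + (c : ZMod 65536))
              ∘ (fun y : ZMod 65536 => (a : ZMod 65536) * y + (c : ZMod 65536)) := by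
          funext z
          simp only [Function.comp, pv_cast_mod]
          push_cast
          ring
        rw [hfun]
        conv_rhs => rw [Function.iterate_mul]
        have h2 : (fun y : ZMod 65536 => (a : ZMod 65536) * y + (c : ZMod 65536))^[2]
            = (fun y : ZMod 65536 => (a : ZMod 65536) * y + (c : ZMod 65536))
              ∘ (fun y : ZMod 65536 => (a : ZMod 65536) * y + (c : ZMod 65536)) := by
          funext z; simp [Function.iterate_succ_apply]
        rw [h2]
      by_cases hodd : n % 2 = 1
      · simp only [hodd, if_true]
        have hn : n = 2 * (n / 2) + 1 := by omega
        conv_rhs => rw [hn]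
        rw [Function.iterate_succ_apply']
        rw [← hsq x, ← ihh x]
        simp only [pv_cast_mod]
        push_cast
        ring
      · simp only [hodd, if_false]
        have hn : n = 2 * (n / 2) := by omega
        conv_rhs => rw [hn]
        rw [← hsq x, ← ihh x]

theorem pv_eq_of_cast_eq (x y : Int) (hx0 : 0 ≤ x) (hx1 : x < 65536) (hy0 : 0 ≤ y) (hy1 : y < 65536)
    (h : (x : ZMod 65536) = (y : ZMod 65536)) : x = y := by
  have := (ZMod.intCast_eq_intCast_iff' x y 65536).mp h
  unfold Int.ModEq at this
  rw [Int.emod_eq_of_lt hx0 (by exact_mod_cast hx1), Int.emod_eq_of_lt hy0 (by exact_mod_cast hy1)] at this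
  exact this

-- ===== VERDICT (by name: the statement is the Claim_ definition above) =====
theorem to_seeded_value_spec : Claim_equal_to_seeded_value := by
  intro s1 s2 _
  unfold Spec_to_seeded_value
  set f : Int → Int := fun s => PySem.Int.mod ((((s + 7) * s1) + s2) * s2 + s1) 65536 with hf
  have hA : to_seeded_value s1 s2 = f^[94010] (s1 * s2) := by
    unfold to_seeded_value
    rw [pv_foldl_const f, PySem.List.length_pyRange_one]
    congr 1
  -- bounds: both sides are a mod of something
  have hAbound : 0 ≤ to_seeded_value s1 s2 ∧ to_seeded_value s1 s2 < 65536 := by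
    rw [hA, show (94010 : Nat) = 94009 + 1 from rfl, Function.iterate_succ_apply']
    exact ⟨pv_mod_nonneg _, pv_mod_lt _⟩
  have hBbound : 0 ≤ to_seeded_value_alt s1 s2 ∧ to_seeded_value_alt s1 s2 < 65536 := by
    unfold to_seeded_value_alt
    exact ⟨pv_mod_nonneg _, pv_mod_lt _⟩
  apply pv_eq_of_cast_eq _ _ hAbound.1 hAbound.2 hBbound.1 hBbound.2
  -- cast both sides into ZMod 65536
  rw [hA, pv_cast_iterate]
  show _ = ((to_seeded_value_alt s1 s2 : Int) : ZMod 65536)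
  unfold to_seeded_value_alt
  simp only [pv_cast_mod]
  push_cast
  rw [pv_powAffine_spec]
  simp only [pv_cast_mod]
  push_cast
  rfl
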